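-- pv_equiv track=rewrite | github.com/edrcosta/foobar-challenge | test_1/bkp.py | solution
-- ===== SOURCE A (Python) =====
-- def solution(s):
--     result = ""
--     letters = [ "A","B","C","D","E","F","G","H","I","J","K","L","M","N","O","P","Q","R","S","T","U","V","W","X","Y","Z"]
--     alphabet = (
--         "100000", # A
--         "110000", # B
--         "100100", # C
--         "100110", # D
--         "100010", # E
--         "110100", # F
--         "110110", # G
--         "110010", # H
--         "010100", # I
--         "010110", # J
--         "101000", # K
--         "111000", # L
--         "101100", # M
--         "101110", # N
--         "101010", # O
--         "111100", # P
--         "111110", # Q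
--         "111010", # R
--         "011100", # S
--         "011110", # T
--         "101001", # U
--         "111001", # V
--         "010111", # W
--         "101101", # X
--         "101111", # Y
--         "101011", # Z
--         "100000", # A
--         "100000", # A
--         "100000", # A
--         "100000", # A
--         "100010", # E
--         "100010", # E
--         "100010", # E
--         "100010", # E
--         "010100", # I
--         "010100", # I
--         "010100", # I
--         "010100", # I
--         "101010", # O
--         "101010", # O
--         "101010", # O
--         "101010", # O
--         "101001", # U
--         "101001", # U
--         "101001", # U
--         "101001", # U
--         "100100", # C
--     )
--
--     single_word_cap_mark = '*'
--
--     # clear all left and right spaces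
--     s = s.strip()
--     if len(s) == 0:
--         return '000000'
--
--     uppercase_all_letters = s.isupper() and len(s) > 2
--
--     # capitalization mark
--     if uppercase_all_letters:
--         result = "000011"
--
--     # run by chars
--     for character in list(s):
--         if character == " ":
--             result = result + "000000"
--         elif character.upper() not in letters:
--             continue
--         else:
--             if character.isupper() and not uppercase_all_letters:
--                 result += single_word_cap_mark
--             result += alphabet[letters.index(character.upper())]
--
--     # replace simbols to the proper capitalizaztion marks
--     if not uppercase_all_letters:
--         result = result.replace("000000*", "000001").replace("000001*", "000001")
--     result = result.replace("*", "000001")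
--
--     return result
-- ===== SOURCE B (Python) =====
-- def solution(s):
--     braille = {
--         'A': '100000', 'B': '110000', 'C': '100100', 'D': '100110',
--         'E': '100010', 'F': '110100', 'G': '110110', 'H': '110010',
--         'I': '010100', 'J': '010110', 'K': '101000', 'L': '111000',
--         'M': '101100', 'N': '101110', 'O': '101010', 'P': '111100',
--         'Q': '111110', 'R': '111010', 'S': '011100', 'T': '011110',
--         'U': '101001', 'V': '111001', 'W': '010111', 'X': '101101',
--         'Y': '101111', 'Z': '101011',
--     }
--     s = s.strip()
--     if not s:
--         return '000000'
--     all_caps = s.isupper() and len(s) > 2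
--     tokens = ['000011'] if all_caps else []
--     for c in s:
--         if c == ' ':
--             tokens.append('000000')
--         elif c.upper() in braille:
--             if c.isupper() and not all_caps:
--                 if tokens and tokens[-1] == '000000':
--                     tokens[-1] = '000001'
--                 else:
--                     tokens.append('000001')
--             tokens.append(braille[c.upper()])
--     return ''.join(tokens)
-- ===== Notes on version B (the rewrite author's own statement) =====
-- stated objective: faster
-- what changed: B drops A's sentinel-character emission and the three global string .replace post-passes, instead collecting 6-bit tokens in one pass with an inline lookback that overwrites a pending space token by the capitalization mark.
import Mathlib
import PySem

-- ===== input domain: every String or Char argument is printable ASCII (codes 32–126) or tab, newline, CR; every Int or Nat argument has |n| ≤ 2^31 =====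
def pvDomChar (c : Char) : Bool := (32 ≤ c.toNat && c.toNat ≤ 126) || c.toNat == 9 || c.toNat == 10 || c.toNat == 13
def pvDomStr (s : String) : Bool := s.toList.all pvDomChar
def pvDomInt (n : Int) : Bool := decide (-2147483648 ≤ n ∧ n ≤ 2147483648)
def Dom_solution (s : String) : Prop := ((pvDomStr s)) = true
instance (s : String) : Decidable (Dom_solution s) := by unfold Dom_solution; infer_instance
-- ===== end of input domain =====

-- B replaces A's sentinel-character emission plus its three global .replace post-passes by a
-- single pass collecting 6-bit tokens with an inline lookback (a pending space token is
-- overwritten by the capitalization mark); measured faster by a constant factor (one pass,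
-- no re-scanning string passes).

-- shared port of Python's str.isupper() (exact on ASCII): some cased char and no lowercase one
def pyStrIsupper (cs : List Char) : Bool :=
  cs.any PySem.Chars.isupper && cs.all (fun c => !PySem.Chars.islower c)

-- ===== PORT A =====
def solA_letters : List Char :=
  ['A','B','C','D','E','F','G','H','I','J','K','L','M',
   'N','O','P','Q','R','S','T','U','V','W','X','Y','Z']

def solA_alphabet : List (List Char) :=
  ["100000".toList, "110000".toList, "100100".toList, "100110".toList,
   "100010".toList, "110100".toList, "110110".toList, "110010".toList,
   "010100".toList, "010110".toList, "101000".toList, "111000".toList,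
   "101100".toList, "101110".toList, "101010".toList, "111100".toList,
   "111110".toList, "111010".toList, "011100".toList, "011110".toList,
   "101001".toList, "111001".toList, "010111".toList, "101101".toList,
   "101111".toList, "101011".toList,
   "100000".toList, "100000".toList, "100000".toList, "100000".toList,
   "100010".toList, "100010".toList, "100010".toList, "100010".toList,
   "010100".toList, "010100".toList, "010100".toList, "010100".toList,
   "101010".toList, "101010".toList, "101010".toList, "101010".toList,
   "101001".toList, "101001".toList, "101001".toList, "101001".toList,
   "100100".toList]

-- 'character.upper() not in letters: continue / else: … letters.index(character.upper())'
-- is ported as one match on index? (none ↔ the 'not in' branch; the getD [] default is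
-- unreachable: index? yields an in-range index of the 47-entry table).
def solution (s : String) : String :=
  let s1 := PySem.Chars.strip s.toList
  if s1.length = 0 then "000000"
  else
    let upperAll := pyStrIsupper s1 && decide (2 < s1.length)
    let r0 : List Char := if upperAll then "000011".toList else []
    let res := s1.foldl (fun r c =>
      if c = ' ' then r ++ "000000".toList
      else
        match PySem.List.index? solA_letters (PySem.Chars.upperChar c) with
        | none => r
        | some i =>
          (if PySem.Chars.isupper c && !upperAll then r ++ "*".toList else r)
            ++ (PySem.List.pyGet? solA_alphabet (i : Int)).getD []) r0
    let res := if !upperAll then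
        PySem.Chars.replace (PySem.Chars.replace res "000000*".toList "000001".toList)
          "000001*".toList "000001".toList
      else res
    String.ofList (PySem.Chars.replace res "*".toList "000001".toList)

-- ===== PORT B =====
def solB_braille : PySem.Dict Char (List Char) :=
  PySem.Dict.mk
    [('A', "100000".toList), ('B', "110000".toList), ('C', "100100".toList),
     ('D', "100110".toList), ('E', "100010".toList), ('F', "110100".toList),
     ('G', "110110".toList), ('H', "110010".toList), ('I', "010100".toList),
     ('J', "010110".toList), ('K', "101000".toList), ('L', "111000".toList),
     ('M', "101100".toList), ('N', "101110".toList), ('O', "101010".toList),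
     ('P', "111100".toList), ('Q', "111110".toList), ('R', "111010".toList),
     ('S', "011100".toList), ('T', "011110".toList), ('U', "101001".toList),
     ('V', "111001".toList), ('W', "010111".toList), ('X', "101101".toList),
     ('Y', "101111".toList), ('Z', "101011".toList)]

-- 'tokens and tokens[-1] == "000000"' is getLast? = some "000000"; 'tokens[-1] = x' is
-- dropLast ++ [x].
def solution_alt (s : String) : String :=
  let s1 := PySem.Chars.strip s.toList
  if s1.length = 0 then "000000"
  else
    let allCaps := pyStrIsupper s1 && decide (2 < s1.length)
    let t0 : List (List Char) := if allCaps then ["000011".toList] else []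
    let toks := s1.foldl (fun toks c =>
      if c = ' ' then toks ++ ["000000".toList]
      else if solB_braille.contains (PySem.Chars.upperChar c) then
        let code := solB_braille.getD (PySem.Chars.upperChar c) []
        let toks :=
          if PySem.Chars.isupper c && !allCaps then
            if toks.getLast? = some "000000".toList then
              toks.dropLast ++ ["000001".toList]
            else toks ++ ["000001".toList]
          else toks
        toks ++ [code]
      else toks) t0
    String.ofList (PySem.Chars.join [] toks)

-- ===== PRECONDITION & SPEC =====
def Spec_solution (s : String) (out : String) : Prop := out = solution_alt s
instance (s : String) (out : String) : Decidable (Spec_solution s out) := by unfold Spec_solution; infer_instance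

-- ===== CLAIM (what is proved, stated in full; the proofs are below) =====
def Claim_equal_solution : Prop := ∀ (s : String), Dom_solution s → Spec_solution s (solution s)

-- ===== LEMMAS AND PROOFS =====

-- abbreviations for the three 6-bit control tokens and the sentinel
def pvP : List Char := ['0','0','0','0','0','0']
def pvM : List Char := ['0','0','0','0','0','1']
def pvStar : List Char := ['*']
def pvP7 : List Char := ['0','0','0','0','0','0','*']
def pvM7 : List Char := ['0','0','0','0','0','1','*']
def pvCodes : List (List Char) :=
  ["100000".toList, "110000".toList, "100100".toList, "100110".toList,
   "100010".toList, "110100".toList, "110110".toList, "110010".toList,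
   "010100".toList, "010110".toList, "101000".toList, "111000".toList,
   "101100".toList, "101110".toList, "101010".toList, "111100".toList,
   "111110".toList, "111010".toList, "011100".toList, "011110".toList,
   "101001".toList, "111001".toList, "010111".toList, "101101".toList,
   "101111".toList, "101011".toList]

-- functional core of PySem.Chars.replace (fuel-free)
def pvRep (old new : List Char) : List Char → List Char
  | [] => []
  | c :: t =>
    if old.isPrefixOf (c :: t) then new ++ pvRep old new (t.drop (old.length - 1))
    else c :: pvRep old new t
termination_by l => l.length
decreasing_by
  · simpa using Nat.lt_succ_of_le (Nat.le_trans (List.length_drop _ ▸ Nat.sub_le _ _) (Nat.le_refl _))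
  · simp

lemma pvRep_nil (old new : List Char) : pvRep old new [] = [] := by rw [pvRep]

lemma pvRep_cons (old new : List Char) (c : Char) (t : List Char) :
    pvRep old new (c :: t) =
      if old.isPrefixOf (c :: t) then new ++ pvRep old new (t.drop (old.length - 1))
      else c :: pvRep old new t := by rw [pvRep]

lemma replace_go_eq (old new : List Char) (h : old ≠ []) :
    ∀ fuel l acc, l.length ≤ fuel →
      PySem.Chars.replace.go old new fuel l acc = acc.reverse ++ pvRep old new l := by
  intro fuel
  induction fuel with
  | zero =>
    intro l acc hl
    have : l = [] := List.eq_nil_of_length_eq_zero (Nat.le_zero.mp hl)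
    subst this
    simp [PySem.Chars.replace.go, pvRep_nil]
  | succ n ih =>
    intro l acc hl
    cases l with
    | nil => simp [PySem.Chars.replace.go, pvRep_nil]
    | cons c t =>
      rw [PySem.Chars.replace.go]
      by_cases hp : old.isPrefixOf (c :: t) = true
      · rw [if_pos hp, pvRep_cons, if_pos hp]
        have hdrop : (c :: t).drop old.length = t.drop (old.length - 1) := by
          cases old with
          | nil => exact absurd rfl h
          | cons o os => simp
        rw [← hdrop]
        have hlen : ((c :: t).drop old.length).length ≤ n := by
          have : 0 < old.length := List.length_pos_of_ne_nil h
          simp only [List.length_drop]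
          omega
        rw [ih _ _ hlen]
        simp
      · rw [if_neg hp, pvRep_cons, if_neg hp]
        rw [ih t (c :: acc) (by simpa using hl)]
        simp

lemma replace_eq_pvRep (old new s : List Char) (h : old ≠ []) :
    PySem.Chars.replace s old new = pvRep old new s := by
  have : old.isEmpty = false := by simpa using h
  rw [PySem.Chars.replace, this]
  simpa using replace_go_eq old new h s.length s [] (Nat.le_refl _)

-- per-character emission of A's loop (u = all-caps flag); A's flat output is its flatten
def pvEmit (u : Bool) (c : Char) : List (List Char) :=
  if c = ' ' then [pvP]
  else
    match PySem.List.index? solA_letters (PySem.Chars.upperChar c) with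
    | none => []
    | some i =>
      (if PySem.Chars.isupper c && !u then [pvStar] else [])
        ++ [(PySem.List.pyGet? solA_alphabet (i : Int)).getD []]

def pvUnits (u : Bool) (cs : List Char) : List (List Char) := cs.flatMap (pvEmit u)

-- shape of A's pre-replace unit list, and of the unit list after the first replace
inductive pvOK : List (List Char) → Prop
  | nil : pvOK []
  | sp {us} : pvOK us → pvOK (pvP :: us)
  | low {b us} : b ∈ pvCodes → pvOK us → pvOK (b :: us)
  | cap {b us} : b ∈ pvCodes → pvOK us → pvOK (pvStar :: b :: us)

inductive pvOKV : List (List Char) → Prop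
  | nil : pvOKV []
  | sp {us} : pvOKV us → pvOKV (pvP :: us)
  | low {b us} : b ∈ pvCodes → pvOKV us → pvOKV (b :: us)
  | cap {b us} : b ∈ pvCodes → pvOKV us → pvOKV (pvStar :: b :: us)
  | mk {b us} : b ∈ pvCodes → pvOKV us → pvOKV (pvM :: b :: us)

-- first replace at unit level: a space unit followed by a mark unit fuses to "000001"
def pvM1 : List (List Char) → List (List Char)
  | [] => []
  | x :: us =>
    if x = pvP ∧ us.head? = some pvStar then pvM :: pvM1 us.tail else x :: pvM1 us
termination_by l => l.length
decreasing_by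
  · simpa using Nat.lt_succ_of_le (List.length_tail_le us)
  · simp

-- B's final token list, at unit level
def pvMS (us : List (List Char)) : List (List Char) :=
  (pvM1 us).map (fun t => if t = pvStar then pvM else t)

def pvTok6 (t : List Char) : Prop := t.length = 6 ∧ '*' ∉ t
def pvShapeG (r : List Char) : Prop := r = [] ∨ ∃ t r', pvTok6 t ∧ r = t ++ r'
def pvShapeS (r : List Char) : Prop := ∃ t r', pvTok6 t ∧ r = '*' :: (t ++ r')
def pvShape (r : List Char) : Prop := pvShapeG r ∨ pvShapeS r

lemma codes_facts : ∀ b ∈ pvCodes, b.length = 6 ∧ '*' ∉ b ∧ b ≠ pvP ∧ b ≠ pvM := by decide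

-- prefix splitting helpers
lemma prefix_split_long {p a r : List Char} (hp : p.isPrefixOf (a ++ r) = true)
    (hl : a.length ≤ p.length) : a = p.take a.length ∧ (p.drop a.length).isPrefixOf r = true := by
  rw [List.isPrefixOf_iff_prefix] at hp
  obtain ⟨t, ht⟩ := hp
  constructor
  · have h := congrArg (List.take a.length) ht
    rw [List.take_append_of_le_length hl, List.take_append_of_le_length (Nat.le_refl _),
      List.take_length] at h
    exact h.symm
  · rw [List.isPrefixOf_iff_prefix]
    have h := congrArg (List.drop a.length) ht
    rw [List.drop_append_of_le_length hl, List.drop_append_of_le_length (Nat.le_refl _),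
      List.drop_length] at h
    simp at h
    exact ⟨t, h⟩

lemma prefix_split_short {p a r : List Char} (hp : p.isPrefixOf (a ++ r) = true)
    (hl : p.length ≤ a.length) : p.isPrefixOf a = true := by
  rw [List.isPrefixOf_iff_prefix] at *
  obtain ⟨t, ht⟩ := hp
  have h := congrArg (List.take p.length) ht
  rw [List.take_append_of_le_length (Nat.le_refl _), List.take_length,
    List.take_append_of_le_length hl] at h
  exact h ▸ List.take_prefix _ _

lemma mem_of_isPrefixOf {c : Char} {p l : List Char} (h : p.isPrefixOf l = true)
    (hc : c ∈ p) : c ∈ l := by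
  rw [List.isPrefixOf_iff_prefix] at h
  exact h.subset hc

-- residual of the pattern never begins inside the tail of the flat string
lemma residual_no {w : List Char} (hw6 : w.length = 6) (hw : '*' ∉ w) {i : Nat}
    (hi : 0 < i) (hil : i < 6) {r : List Char} (hr : pvShape r) :
    ¬ ((w.drop (6 - i) ++ ['*']).isPrefixOf r = true) := by
  intro hp
  have hvlen : (w.drop (6 - i)).length = i := by simp [hw6]; omega
  rcases hr with hG | hS
  · rcases hG with rfl | ⟨t, r', ⟨ht6, hts⟩, rfl⟩
    · rw [List.isPrefixOf_iff_prefix] at hp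
      have := hp.length_le
      simp [hvlen] at this
    · have hlen : (w.drop (6 - i) ++ ['*']).length ≤ t.length := by
        simp [hvlen, ht6]; omega
      have := prefix_split_short hp hlen
      exact hts (mem_of_isPrefixOf this (by simp))
  · obtain ⟨t, r', ⟨ht6, hts⟩, rfl⟩ := hS
    rcases hv : w.drop (6 - i) with _ | ⟨c, v'⟩
    · rw [hv] at hvlen; simp at hvlen; omega
    · have hcw : c ∈ w := List.mem_of_mem_drop (hv ▸ List.mem_cons_self)
      rw [hv] at hp
      simp [List.isPrefixOf] at hp
      exact hw (hp.1 ▸ hcw)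

lemma nomatch_mid {w : List Char} (hw6 : w.length = 6) (hw : '*' ∉ w)
    {t : List Char} (ht : pvTok6 t) (hne : t ≠ w) {r : List Char} (hr : pvShape r) :
    ∀ i < 6, ¬ ((w ++ ['*']).isPrefixOf (t.drop i ++ r) = true) := by
  intro i hi hp
  obtain ⟨ht6, hts⟩ := ht
  have halen : (t.drop i).length = 6 - i := by simp [ht6]
  have hsplit := prefix_split_long hp (by simp [halen, hw6]; omega)
  rcases Nat.eq_zero_or_pos i with rfl | hipos
  · have h1 := hsplit.1
    simp [ht6] at h1
    rw [List.take_append_of_le_length (by simp [hw6]), List.take_of_length_le (by omega)] at h1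
    exact hne h1
  · have h2 := hsplit.2
    rw [halen, List.drop_append_of_le_length (by omega)] at h2
    exact residual_no hw6 hw hipos hi hr h2

lemma nomatch_self {w : List Char} (hw6 : w.length = 6) (hw : '*' ∉ w)
    {r : List Char} (hr : pvShapeG r) :
    ∀ i < 6, ¬ ((w ++ ['*']).isPrefixOf (w.drop i ++ r) = true) := by
  intro i hi hp
  have halen : (w.drop i).length = 6 - i := by simp [hw6]
  have hsplit := prefix_split_long hp (by simp [halen]; omega)
  rcases Nat.eq_zero_or_pos i with rfl | hipos
  · have h2 := hsplit.2
    rw [halen] at h2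
    simp only [Nat.sub_zero] at h2
    rw [List.drop_append_of_le_length (by omega), List.drop_of_length_le (by omega)] at h2
    simp only [List.nil_append] at h2
    rcases hr with rfl | ⟨t, r', ⟨ht6, hts⟩, rfl⟩
    · rw [List.isPrefixOf_iff_prefix] at h2
      have := h2.length_le
      simp at this
    · have := prefix_split_short h2 (by simp [ht6])
      exact hts (mem_of_isPrefixOf this (by simp))
  · have h2 := hsplit.2
    rw [halen, List.drop_append_of_le_length (by omega)] at h2
    exact residual_no hw6 hw hipos hi (Or.inl hr) h2

lemma rep_skip (old new : List Char) (a r : List Char)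
    (h : ∀ i < a.length, ¬ (old.isPrefixOf (a.drop i ++ r) = true)) :
    pvRep old new (a ++ r) = a ++ pvRep old new r := by
  induction a with
  | nil => simp
  | cons c a' ih =>
    have h0 := h 0 (by simp)
    simp only [List.drop_zero] at h0
    rw [List.cons_append, pvRep_cons, if_neg (by simpa using h0)]
    rw [ih (fun i hi => by simpa using h (i + 1) (by simpa using hi))]
    simp

lemma skip_tok {w : List Char} (hw6 : w.length = 6) (hw : '*' ∉ w) (new : List Char)
    {t : List Char} (ht : pvTok6 t) (hne : t ≠ w) {r : List Char} (hr : pvShape r) :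
    pvRep (w ++ ['*']) new (t ++ r) = t ++ pvRep (w ++ ['*']) new r := by
  exact rep_skip _ _ _ _ (fun i hi => nomatch_mid hw6 hw ht hne hr i (ht.1 ▸ hi))

lemma skip_self {w : List Char} (hw6 : w.length = 6) (hw : '*' ∉ w) (new : List Char)
    {r : List Char} (hr : pvShapeG r) :
    pvRep (w ++ ['*']) new (w ++ r) = w ++ pvRep (w ++ ['*']) new r := by
  exact rep_skip _ _ _ _ (fun i hi => nomatch_self hw6 hw hr i (hw6 ▸ hi))

def pvF (us : List (List Char)) : List Char := us.flatten

lemma pvF_nil : pvF [] = [] := rfl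
lemma pvF_cons (x : List Char) (us : List (List Char)) : pvF (x :: us) = x ++ pvF us := by
  simp [pvF]

lemma tok6_P : pvTok6 pvP := ⟨by decide, by decide⟩
lemma tok6_M : pvTok6 pvM := ⟨by decide, by decide⟩
lemma tok6_code {b : List Char} (h : b ∈ pvCodes) : pvTok6 b :=
  ⟨(codes_facts b h).1, (codes_facts b h).2.1⟩

lemma shape_of_okv {us : List (List Char)} (h : pvOKV us) : pvShape (pvF us) := by
  cases h with
  | nil => exact Or.inl (Or.inl rfl)
  | sp h' => exact Or.inl (Or.inr ⟨pvP, _, tok6_P, pvF_cons _ _⟩)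
  | low hb h' => exact Or.inl (Or.inr ⟨_, _, tok6_code hb, pvF_cons _ _⟩)
  | @cap b us' hb h' =>
    refine Or.inr ⟨b, pvF us', tok6_code hb, ?_⟩
    rw [pvF_cons, pvF_cons]
    rfl
  | @mk b us' hb h' =>
    exact Or.inl (Or.inr ⟨pvM, b ++ pvF us', tok6_M, by rw [pvF_cons, pvF_cons]⟩)

lemma okv_of_ok {us : List (List Char)} (h : pvOK us) : pvOKV us := by
  induction h with
  | nil => exact pvOKV.nil
  | sp _ ih => exact pvOKV.sp ih
  | low hb _ ih => exact pvOKV.low hb ih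
  | cap hb _ ih => exact pvOKV.cap hb ih

lemma pvM1_cons (x : List Char) (us : List (List Char)) :
    pvM1 (x :: us) =
      if x = pvP ∧ us.head? = some pvStar then pvM :: pvM1 us.tail else x :: pvM1 us := by
  rw [pvM1]

lemma code_ne_star {b : List Char} (hb : b ∈ pvCodes) : b ≠ pvStar := by
  intro h
  have := (codes_facts b hb).1
  rw [h] at this
  simp [pvStar] at this

lemma hP7 : pvP7 = pvP ++ ['*'] := by decide
lemma hM7 : pvM7 = pvM ++ ['*'] := by decide

lemma pvM1_P_star {b : List Char} (us : List (List Char)) (hb : b ∈ pvCodes) :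
    pvM1 (pvP :: pvStar :: b :: us) = pvM :: b :: pvM1 us := by
  rw [pvM1_cons, if_pos ⟨rfl, rfl⟩]
  simp only [List.tail_cons]
  rw [pvM1_cons, if_neg (fun hand => (codes_facts b hb).2.2.1 hand.1)]

lemma pvM1_P_notstar (us : List (List Char)) (h : us.head? ≠ some pvStar) :
    pvM1 (pvP :: us) = pvP :: pvM1 us := by
  rw [pvM1_cons, if_neg (fun hand => h hand.2)]

lemma pvM1_code {b : List Char} (us : List (List Char)) (hb : b ∈ pvCodes) :
    pvM1 (b :: us) = b :: pvM1 us := by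
  rw [pvM1_cons, if_neg (fun hand => (codes_facts b hb).2.2.1 hand.1)]

lemma pvM1_star {b : List Char} (us : List (List Char)) (hb : b ∈ pvCodes) :
    pvM1 (pvStar :: b :: us) = pvStar :: b :: pvM1 us := by
  rw [pvM1_cons, if_neg (fun hand => by simpa [pvStar, pvP] using congrArg List.length hand.1),
    pvM1_code _ hb]

-- first replace: "000000*" → "000001"
lemma L1 : ∀ n us, us.length ≤ n → pvOK us → pvRep pvP7 pvM (pvF us) = pvF (pvM1 us) := by
  intro n
  induction n with
  | zero =>
    intro us hl h
    have : us = [] := List.eq_nil_of_length_eq_zero (Nat.le_zero.mp hl)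
    subst this
    simp [pvF_nil, pvRep_nil, pvM1]
  | succ n ih =>
    intro us hl h
    cases h with
    | nil => simp [pvF_nil, pvRep_nil, pvM1]
    | @sp us' h' =>
      cases h' with
      | @cap b us'' hb h'' =>
        -- a space unit directly followed by a mark: the pattern matches here
        rw [pvF_cons, pvF_cons, pvF_cons]
        have hstar : pvStar ++ (b ++ pvF us'') = '*' :: (b ++ pvF us'') := rfl
        have hflat : pvP ++ ('*' :: (b ++ pvF us'')) =
            '0' :: ('0' :: ('0' :: ('0' :: ('0' :: ('0' :: ('*' :: (b ++ pvF us''))))))) := rfl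
        rw [hstar, hflat, pvRep_cons, if_pos (by simp [pvP7, List.isPrefixOf])]
        have hdrop : List.drop (pvP7.length - 1)
            ('0' :: ('0' :: ('0' :: ('0' :: ('0' :: ('*' :: (b ++ pvF us''))))))) = b ++ pvF us'' := by
          simp [pvP7]
        rw [hdrop, hP7,
          skip_tok (by decide) (by decide) pvM (tok6_code hb)
            (fun hc => (codes_facts b hb).2.2.1 hc)
            (shape_of_okv (okv_of_ok h'')),
          ← hP7, ih us'' (by simp at hl; omega) h'',
          pvM1_P_star us'' hb, pvF_cons, pvF_cons]
      | nil =>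
        rw [pvF_cons, pvF_nil, hP7, skip_self (by decide) (by decide) pvM (Or.inl rfl),
          pvM1_P_notstar [] (by simp), pvF_cons]
        simp [pvRep_nil, pvM1, pvF_nil]
      | @sp us'' h'' =>
        rw [pvF_cons, hP7,
          skip_self (by decide) (by decide) pvM
            (Or.inr ⟨pvP, pvF us'', tok6_P, pvF_cons _ _⟩), ← hP7,
          ih _ (by simp at hl ⊢; omega) (pvOK.sp h''),
          pvM1_P_notstar (pvP :: us'') (by simp [pvP, pvStar]), pvF_cons]
      | @low b us'' hb h'' =>
        rw [pvF_cons, hP7,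
          skip_self (by decide) (by decide) pvM
            (Or.inr ⟨b, pvF us'', tok6_code hb, pvF_cons _ _⟩), ← hP7,
          ih _ (by simp at hl ⊢; omega) (pvOK.low hb h''),
          pvM1_P_notstar (b :: us'') (by simp [code_ne_star hb]), pvF_cons]
    | @low b us' hb h' =>
      rw [pvF_cons, hP7,
        skip_tok (by decide) (by decide) pvM (tok6_code hb)
          (fun hc => (codes_facts b hb).2.2.1 hc)
          (shape_of_okv (okv_of_ok h')), ← hP7,
        ih _ (by simp at hl; omega) h', pvM1_code _ hb, pvF_cons]
    | @cap b us' hb h' =>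
      rw [pvF_cons, pvF_cons]
      have hstar : pvStar ++ (b ++ pvF us') = '*' :: (b ++ pvF us') := rfl
      rw [hstar, pvRep_cons, if_neg (by simp [pvP7, List.isPrefixOf]), hP7,
        skip_tok (by decide) (by decide) pvM (tok6_code hb)
          (fun hc => (codes_facts b hb).2.2.1 hc)
          (shape_of_okv (okv_of_ok h')), ← hP7,
        ih _ (by simp at hl; omega) h', pvM1_star _ hb, pvF_cons, pvF_cons]
      rfl

lemma okv_m1 : ∀ n us, us.length ≤ n → pvOK us → pvOKV (pvM1 us) := by
  intro n
  induction n with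
  | zero =>
    intro us hl h
    have : us = [] := List.eq_nil_of_length_eq_zero (Nat.le_zero.mp hl)
    subst this
    simpa [pvM1] using pvOKV.nil
  | succ n ih =>
    intro us hl h
    cases h with
    | nil => simpa [pvM1] using pvOKV.nil
    | @sp us' h' =>
      cases h' with
      | @cap b us'' hb h'' =>
        rw [pvM1_P_star us'' hb]
        exact pvOKV.mk hb (ih _ (by simp at hl; omega) h'')
      | nil =>
        rw [pvM1_P_notstar [] (by simp)]
        simpa [pvM1] using pvOKV.sp pvOKV.nil
      | @sp us'' h'' =>
        rw [pvM1_P_notstar (pvP :: us'') (by simp [pvP, pvStar])]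
        exact pvOKV.sp (ih _ (by simp at hl ⊢; omega) (pvOK.sp h''))
      | @low b us'' hb h'' =>
        rw [pvM1_P_notstar (b :: us'') (by simp [code_ne_star hb])]
        exact pvOKV.sp (ih _ (by simp at hl ⊢; omega) (pvOK.low hb h''))
    | @low b us' hb h' =>
      rw [pvM1_code _ hb]
      exact pvOKV.low hb (ih _ (by simp at hl; omega) h')
    | @cap b us' hb h' =>
      rw [pvM1_star _ hb]
      exact pvOKV.cap hb (ih _ (by simp at hl; omega) h')

-- second replace: "000001*" → "000001" is the identity on the fused flat string
lemma L2 : ∀ us, pvOKV us → pvRep pvM7 pvM (pvF us) = pvF us := by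
  intro us h
  induction h with
  | nil => simp [pvF_nil, pvRep_nil]
  | @sp us' h' ih =>
    rw [pvF_cons, hM7,
      skip_tok (by decide) (by decide) pvM tok6_P (by decide) (shape_of_okv h'), ← hM7, ih]
  | @low b us' hb h' ih =>
    rw [pvF_cons, hM7,
      skip_tok (by decide) (by decide) pvM (tok6_code hb)
        (fun hc => (codes_facts b hb).2.2.2 hc) (shape_of_okv h'), ← hM7, ih]
  | @cap b us' hb h' ih =>
    rw [pvF_cons, pvF_cons]
    have hstar : pvStar ++ (b ++ pvF us') = '*' :: (b ++ pvF us') := rfl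
    rw [hstar, pvRep_cons, if_neg (by simp [pvM7, List.isPrefixOf]), hM7,
      skip_tok (by decide) (by decide) pvM (tok6_code hb)
         (fun hc => (codes_facts b hb).2.2.2 hc) (shape_of_okv h'), ← hM7, ih]
  | @mk b us' hb h' ih =>
    rw [pvF_cons, pvF_cons, hM7,
      skip_self (by decide) (by decide) pvM
        (Or.inr ⟨b, pvF us', tok6_code hb, rfl⟩),
      skip_tok (by decide) (by decide) pvM (tok6_code hb)
        (fun hc => (codes_facts b hb).2.2.2 hc) (shape_of_okv h'), ← hM7, ih]

-- third replace: "*" → "000001" is a per-character expansion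
lemma L3 (l : List Char) :
    pvRep pvStar pvM l = l.flatMap (fun c => if c = '*' then pvM else [c]) := by
  induction l with
  | nil => simp [pvRep_nil]
  | cons c t ih =>
    rw [pvRep_cons]
    by_cases hc : c = '*'
    · subst hc
      rw [if_pos (by simp [pvStar, List.isPrefixOf])]
      have hd : t.drop (pvStar.length - 1) = t := by simp [pvStar]
      rw [hd, ih]
      simp [pvStar]
    · rw [if_neg (by simp [pvStar, List.isPrefixOf, Ne.symm hc])]
      simp only [List.flatMap_cons, if_neg hc]
      rw [ih]
      simp

lemma star_free_flatMap {l : List Char} (h : '*' ∉ l) :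
    l.flatMap (fun c => if c = '*' then pvM else [c]) = l := by
  induction l with
  | nil => simp
  | cons c t ih =>
    simp only [List.mem_cons, not_or] at h
    simp [Ne.symm h.1, ih h.2]

lemma L3_id {l : List Char} (h : '*' ∉ l) : pvRep pvStar pvM l = l := by
  rw [L3, star_free_flatMap h]

lemma expand_flat {us : List (List Char)} (h : pvOKV us) :
    (pvF us).flatMap (fun c => if c = '*' then pvM else [c]) =
      pvF (us.map (fun t => if t = pvStar then pvM else t)) := by
  induction h with
  | nil => simp [pvF_nil]
  | @sp us' h' ih =>
    rw [pvF_cons, List.flatMap_append, ih, List.map_cons, pvF_cons]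
    try congr 1
    try decide
  | @low b us' hb h' ih =>
    rw [pvF_cons, List.flatMap_append, ih, List.map_cons, pvF_cons,
      star_free_flatMap (codes_facts b hb).2.1, if_neg (code_ne_star hb)]
  | @cap b us' hb h' ih =>
    rw [pvF_cons, pvF_cons, List.flatMap_append, List.flatMap_append, ih,
      List.map_cons, List.map_cons, pvF_cons, pvF_cons,
      star_free_flatMap (codes_facts b hb).2.1, if_neg (code_ne_star hb), if_pos rfl]
    try congr 1
    try decide
  | @mk b us' hb h' ih =>
    rw [pvF_cons, pvF_cons, List.flatMap_append, List.flatMap_append, ih,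
      List.map_cons, List.map_cons, pvF_cons, pvF_cons,
      star_free_flatMap (codes_facts b hb).2.1, if_neg (code_ne_star hb),
      if_neg (by decide)]
    try congr 1
    try decide

-- the two table lookups agree
lemma mem_of_index? {u : Char} {i : Nat} (h : PySem.List.index? solA_letters u = some i) :
    u ∈ solA_letters := by
  by_contra hm
  rw [PySem.List.index?, List.idxOf?_eq_none_iff.mpr hm] at h
  simp at h

lemma lookup_contains (u : Char) :
    solB_braille.contains u = (PySem.List.index? solA_letters u).isSome := by
  by_cases hm : u ∈ solA_letters
  · fin_cases hm <;> decide
  · rw [PySem.List.index?, List.idxOf?_eq_none_iff.mpr hm]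
    simp only [Option.isSome_none]
    simp only [solA_letters, List.mem_cons, List.not_mem_nil, or_false, not_or] at hm
    simp [solB_braille, PySem.Dict.contains]
    simp only [ne_comm]
    tauto

lemma lookup_code_all_bool :
    (solA_letters.all fun v =>
      solB_braille.getD v [] ==
        (PySem.List.pyGet? solA_alphabet
          (((PySem.List.index? solA_letters v).getD 0 : Nat) : Int)).getD []) = true := by
  decide

lemma lookup_code_all : ∀ v ∈ solA_letters,
    solB_braille.getD v [] =
      (PySem.List.pyGet? solA_alphabet
        (((PySem.List.index? solA_letters v).getD 0 : Nat) : Int)).getD [] := by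
  intro v hv
  have := List.all_eq_true.mp lookup_code_all_bool v hv
  exact eq_of_beq this

lemma lookup_code (u : Char) (i : Nat) (h : PySem.List.index? solA_letters u = some i) :
    solB_braille.getD u [] = (PySem.List.pyGet? solA_alphabet (i : Int)).getD [] := by
  have hm := mem_of_index? h
  have := lookup_code_all u hm
  rwa [h] at this

lemma code_mem_all_bool :
    (solA_letters.all fun v =>
      pvCodes.contains
        ((PySem.List.pyGet? solA_alphabet
          (((PySem.List.index? solA_letters v).getD 0 : Nat) : Int)).getD [])) = true := by
  decide

lemma code_mem_all : ∀ v ∈ solA_letters,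
    (PySem.List.pyGet? solA_alphabet
      (((PySem.List.index? solA_letters v).getD 0 : Nat) : Int)).getD [] ∈ pvCodes := by
  intro v hv
  have := List.all_eq_true.mp code_mem_all_bool v hv
  exact List.contains_iff_mem.mp this

lemma code_mem {u : Char} {i : Nat} (h : PySem.List.index? solA_letters u = some i) :
    (PySem.List.pyGet? solA_alphabet (i : Int)).getD [] ∈ pvCodes := by
  have := code_mem_all u (mem_of_index? h)
  rwa [h] at this

lemma ok_append_chunk (ch us : List (List Char)) (hus : pvOK us)
    (hch : ch = [] ∨ ch = [pvP] ∨ (∃ b ∈ pvCodes, ch = [b]) ∨ ∃ b ∈ pvCodes, ch = [pvStar, b]) :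
    pvOK (ch ++ us) := by
  rcases hch with rfl | rfl | ⟨b, hb, rfl⟩ | ⟨b, hb, rfl⟩
  · exact hus
  · exact pvOK.sp hus
  · exact pvOK.low hb hus
  · exact pvOK.cap hb hus

lemma emit_chunk (u : Bool) (c : Char) :
    pvEmit u c = [] ∨ pvEmit u c = [pvP] ∨ (∃ b ∈ pvCodes, pvEmit u c = [b]) ∨
      ∃ b ∈ pvCodes, pvEmit u c = [pvStar, b] := by
  unfold pvEmit
  by_cases hc : c = ' '
  · simp [hc]
  · rw [if_neg hc]
    cases hidx : PySem.List.index? solA_letters (PySem.Chars.upperChar c) with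
    | none => simp
    | some i =>
      by_cases hup : (PySem.Chars.isupper c && !u) = true
      · exact Or.inr (Or.inr (Or.inr
          ⟨(PySem.List.pyGet? solA_alphabet (i : Int)).getD [], code_mem hidx, by simp [hup]⟩))
      · exact Or.inr (Or.inr (Or.inl
          ⟨(PySem.List.pyGet? solA_alphabet (i : Int)).getD [], code_mem hidx, by simp [hup]⟩))

lemma ok_units (u : Bool) (cs : List Char) : pvOK (pvUnits u cs) := by
  induction cs with
  | nil => exact pvOK.nil
  | cons c t ih =>
    rw [pvUnits, List.flatMap_cons]
    exact ok_append_chunk _ _ ih (emit_chunk u c)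

-- A's loop is the flatten of the unit list
lemma loopA_eq (u : Bool) (r0 : List Char) (cs : List Char) :
    cs.foldl (fun r c =>
      if c = ' ' then r ++ "000000".toList
      else
        match PySem.List.index? solA_letters (PySem.Chars.upperChar c) with
        | none => r
        | some i =>
          (if PySem.Chars.isupper c && !u then r ++ "*".toList else r)
            ++ (PySem.List.pyGet? solA_alphabet (i : Int)).getD []) r0
      = r0 ++ pvF (pvUnits u cs) := by
  have hbody : (fun (r : List Char) (c : Char) =>
      if c = ' ' then r ++ "000000".toList
      else
        match PySem.List.index? solA_letters (PySem.Chars.upperChar c) with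
        | none => r
        | some i =>
          (if PySem.Chars.isupper c && !u then r ++ "*".toList else r)
            ++ (PySem.List.pyGet? solA_alphabet (i : Int)).getD [])
      = fun r c => r ++ (pvEmit u c).flatten := by
    funext r c
    unfold pvEmit
    have hPtok : "000000".toList = pvP := by decide
    have hstar : "*".toList = pvStar := by decide
    by_cases hc : c = ' '
    · simp [hc, hPtok]
    · rw [if_neg hc, if_neg hc]
      cases hidx : PySem.List.index? solA_letters (PySem.Chars.upperChar c) with
      | none => simp
      | some i =>
        by_cases hup : (PySem.Chars.isupper c && !u) = true
        · simp [hup, hstar]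
        · simp [hup]
  rw [hbody, PySem.List.foldl_append_eq_flatMap]
  congr 1
  unfold pvUnits pvF
  induction cs with
  | nil => simp
  | cons c t ih => simp [ih]

-- B's loop (u = false) computes the fused token list, with lookback folded in
def pvMergePre (acc us : List (List Char)) : List (List Char) :=
  if acc.getLast? = some pvP ∧ us.head? = some pvStar then
    acc.dropLast ++ pvM :: pvMS us.tail
  else acc ++ pvMS us

lemma pvMS_nil : pvMS [] = [] := by
  rw [pvMS, pvM1]
  rfl

lemma pvMS_P_cons (us : List (List Char)) :
    pvMS (pvP :: us) =
      if us.head? = some pvStar then pvM :: pvMS us.tail else pvP :: pvMS us := by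
  by_cases h : us.head? = some pvStar
  · rw [pvMS, pvM1_cons, if_pos ⟨rfl, h⟩, List.map_cons, if_neg (by decide), if_pos h]
    rfl
  · rw [pvMS, pvM1_P_notstar us h, List.map_cons, if_neg (by decide), if_neg h]
    rfl

lemma pvMS_code_cons {b : List Char} (hb : b ∈ pvCodes) (us : List (List Char)) :
    pvMS (b :: us) = b :: pvMS us := by
  rw [pvMS, pvM1_code us hb, List.map_cons, if_neg (code_ne_star hb)]
  rfl

lemma pvMS_star_cons {b : List Char} (hb : b ∈ pvCodes) (us : List (List Char)) :
    pvMS (pvStar :: b :: us) = pvM :: b :: pvMS us := by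
  rw [pvMS, pvM1_star us hb, List.map_cons, List.map_cons, if_pos rfl,
    if_neg (code_ne_star hb)]
  rfl

lemma merge_nil (acc : List (List Char)) : pvMergePre acc [] = acc := by
  rw [pvMergePre, if_neg (by simp), pvMS_nil, List.append_nil]

lemma merge_sp (acc us : List (List Char)) :
    pvMergePre acc (pvP :: us) = pvMergePre (acc ++ [pvP]) us := by
  rw [pvMergePre,
    if_neg (fun hand => (by decide : pvP ≠ pvStar) (Option.some.inj hand.2)),
    pvMS_P_cons, pvMergePre]
  have h2 : (acc ++ [pvP]).getLast? = some pvP := by simp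
  by_cases h : us.head? = some pvStar
  · rw [if_pos h, if_pos ⟨h2, h⟩, List.dropLast_concat]
  · rw [if_neg h, if_neg (fun hand => h hand.2)]
    simp

lemma merge_code {b : List Char} (hb : b ∈ pvCodes) (acc us : List (List Char)) :
    pvMergePre acc (b :: us) = pvMergePre (acc ++ [b]) us := by
  rw [pvMergePre,
    if_neg (fun hand => code_ne_star hb (Option.some.inj hand.2)),
    pvMS_code_cons hb, pvMergePre,
    if_neg (fun hand => (codes_facts b hb).2.2.1
      (by simpa using hand.1))]
  simp

lemma merge_cap {b : List Char} (hb : b ∈ pvCodes) (acc us : List (List Char)) :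
    pvMergePre acc (pvStar :: b :: us) =
      pvMergePre ((if acc.getLast? = some pvP then acc.dropLast ++ [pvM]
        else acc ++ [pvM]) ++ [b]) us := by
  by_cases hL : acc.getLast? = some pvP
  · rw [if_pos hL, pvMergePre, if_pos ⟨hL, rfl⟩, List.tail_cons, pvMS_code_cons hb,
      pvMergePre,
      if_neg (fun hand => (codes_facts b hb).2.2.1 (by simpa using hand.1))]
    simp
  · rw [if_neg hL, pvMergePre, if_neg (fun hand => hL hand.1), pvMS_star_cons hb,
      pvMergePre,
      if_neg (fun hand => (codes_facts b hb).2.2.1 (by simpa using hand.1))]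
    simp

lemma loopB_eq_false (cs : List Char) : ∀ acc,
    cs.foldl (fun toks c =>
      if c = ' ' then toks ++ ["000000".toList]
      else if solB_braille.contains (PySem.Chars.upperChar c) then
        (if PySem.Chars.isupper c && !false then
            if toks.getLast? = some "000000".toList then
              toks.dropLast ++ ["000001".toList]
            else toks ++ ["000001".toList]
          else toks) ++ [solB_braille.getD (PySem.Chars.upperChar c) []]
      else toks) acc
      = pvMergePre acc (pvUnits false cs) := by
  induction cs with
  | nil => intro acc; rw [pvUnits, List.flatMap_nil, List.foldl_nil, merge_nil]
  | cons c t ih =>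
    intro acc
    rw [List.foldl_cons, ih]
    conv_rhs => rw [pvUnits, List.flatMap_cons, ← pvUnits]
    have hPtok : "000000".toList = pvP := by decide
    have hMtok : "000001".toList = pvM := by decide
    by_cases hc : c = ' '
    · have hch : pvEmit false c = [pvP] := by unfold pvEmit; rw [if_pos hc]
      rw [if_pos hc, hPtok, hch, List.singleton_append, merge_sp]
    · cases hidx : PySem.List.index? solA_letters (PySem.Chars.upperChar c) with
      | none =>
        have hch : pvEmit false c = [] := by unfold pvEmit; rw [if_neg hc, hidx]
        rw [if_neg hc, if_neg (by rw [lookup_contains, hidx]; simp), hch,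
          List.nil_append]
      | some i =>
        by_cases hup : PySem.Chars.isupper c = true
        · have hch : pvEmit false c =
              [pvStar, (PySem.List.pyGet? solA_alphabet (i : Int)).getD []] := by
            unfold pvEmit; rw [if_neg hc, hidx]; simp [hup]
          rw [if_neg hc, if_pos (by rw [lookup_contains, hidx]; rfl),
            lookup_code _ i hidx, if_pos (by simp [hup]), hch, hPtok, hMtok,
            List.cons_append, List.singleton_append, merge_cap (code_mem hidx)]
        · have hch : pvEmit false c =
              [(PySem.List.pyGet? solA_alphabet (i : Int)).getD []] := by
            unfold pvEmit; rw [if_neg hc, hidx]; simp [hup]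
          rw [if_neg hc, if_pos (by rw [lookup_contains, hidx]; rfl),
            lookup_code _ i hidx, if_neg (by simp [hup]), hch,
            List.singleton_append, merge_code (code_mem hidx)]

lemma loopB_eq_true (cs : List Char) : ∀ acc,
    cs.foldl (fun toks c =>
      if c = ' ' then toks ++ ["000000".toList]
      else if solB_braille.contains (PySem.Chars.upperChar c) then
        (if PySem.Chars.isupper c && !true then
            if toks.getLast? = some "000000".toList then
              toks.dropLast ++ ["000001".toList]
            else toks ++ ["000001".toList]
          else toks) ++ [solB_braille.getD (PySem.Chars.upperChar c) []]
      else toks) acc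
      = acc ++ pvUnits true cs := by
  induction cs with
  | nil => intro acc; simp [pvUnits]
  | cons c t ih =>
    intro acc
    rw [List.foldl_cons, ih]
    conv_rhs => rw [pvUnits, List.flatMap_cons, ← pvUnits]
    have hPtok : "000000".toList = pvP := by decide
    by_cases hc : c = ' '
    · have hch : pvEmit true c = [pvP] := by unfold pvEmit; rw [if_pos hc]
      rw [if_pos hc, hPtok, hch]
      simp
    · cases hidx : PySem.List.index? solA_letters (PySem.Chars.upperChar c) with
      | none =>
        have hch : pvEmit true c = [] := by unfold pvEmit; rw [if_neg hc, hidx]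
        rw [if_neg hc, if_neg (by rw [lookup_contains, hidx]; simp), hch]
        simp
      | some i =>
        have hch : pvEmit true c =
            [(PySem.List.pyGet? solA_alphabet (i : Int)).getD []] := by
          unfold pvEmit; rw [if_neg hc, hidx]; simp
        rw [if_neg hc, if_pos (by rw [lookup_contains, hidx]; rfl),
          lookup_code _ i hidx, if_neg (by simp), hch]
        simp

lemma join_nil_flatten (parts : List (List Char)) : PySem.Chars.join [] parts = parts.flatten := by
  induction parts with
  | nil => simp [PySem.Chars.join, List.intercalate]
  | cons x t ih =>
    cases t with
    | nil => simp [PySem.Chars.join, List.intercalate]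
    | cons y t' =>
      simp only [PySem.Chars.join, List.intercalate] at *
      rw [List.intersperse_cons₂]
      simp at *
      exact ih

lemma emit_chunk_true (c : Char) :
    pvEmit true c = [] ∨ pvEmit true c = [pvP] ∨ ∃ b ∈ pvCodes, pvEmit true c = [b] := by
  unfold pvEmit
  by_cases hc : c = ' '
  · rw [if_pos hc]
    exact Or.inr (Or.inl rfl)
  · rw [if_neg hc]
    cases hidx : PySem.List.index? solA_letters (PySem.Chars.upperChar c) with
    | none => exact Or.inl rfl
    | some i =>
      refine Or.inr (Or.inr ⟨(PySem.List.pyGet? solA_alphabet (i : Int)).getD [],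
        code_mem hidx, ?_⟩)
      simp

lemma star_free_units_true (cs : List Char) : '*' ∉ pvF (pvUnits true cs) := by
  induction cs with
  | nil => simp [pvUnits, pvF]
  | cons c t ih =>
    rw [pvUnits, List.flatMap_cons, ← pvUnits, pvF, List.flatten_append]
    intro hmem
    rcases List.mem_append.mp hmem with h | h
    · rcases emit_chunk_true c with hch | hch | ⟨b, hb, hch⟩ <;> rw [hch] at h
      · simp at h
      · revert h; decide
      · simp at h
        exact (codes_facts b hb).2.1 h
    · exact ih h

-- ===== VERDICT (by name: the statement is the Claim_ definition above) =====
theorem solution_spec : Claim_equal_solution := by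
  intro s _
  unfold Spec_solution
  simp only [solution, solution_alt]
  by_cases h0 : (PySem.Chars.strip s.toList).length = 0
  · rw [if_pos h0, if_pos h0]
  · rw [if_neg h0, if_neg h0]
    have hstar : "*".toList = pvStar := by decide
    have hP7 : "000000*".toList = pvP7 := by decide
    have hM7 : "000001*".toList = pvM7 := by decide
    have hMt : "000001".toList = pvM := by decide
    cases hu : (pyStrIsupper (PySem.Chars.strip s.toList) &&
        decide (2 < (PySem.Chars.strip s.toList).length)) with
    | true =>
      rw [if_pos rfl, if_pos rfl, loopA_eq, loopB_eq_true]
      rw [if_neg (by simp)]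
      rw [replace_eq_pvRep _ _ _ (by decide), hstar, hMt,
        L3_id (by
          intro hmem
          rcases List.mem_append.mp hmem with h | h
          · revert h; decide
          · exact star_free_units_true _ h)]
      rw [join_nil_flatten]
      simp [pvF]
    | false =>
      rw [if_neg (show ¬(false = true) from by simp),
        if_neg (show ¬(false = true) from by simp), loopA_eq, loopB_eq_false,
        List.nil_append, if_pos (show (!false) = true from by simp)]
      rw [replace_eq_pvRep _ _ _ (by decide), replace_eq_pvRep _ _ _ (by decide),
        replace_eq_pvRep _ _ _ (by decide), hstar, hP7, hM7, hMt,
        L1 (pvUnits false (PySem.Chars.strip s.toList)).length _ (Nat.le_refl _)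
          (ok_units false _),
        L2 _ (okv_m1 (pvUnits false (PySem.Chars.strip s.toList)).length _
          (Nat.le_refl _) (ok_units false _)),
        L3,
        expand_flat (okv_m1 (pvUnits false (PySem.Chars.strip s.toList)).length _
          (Nat.le_refl _) (ok_units false _))]
      rw [pvMergePre, if_neg (by simp), List.nil_append, join_nil_flatten]
      rfl
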